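-- pv_equiv track=rewrite | github.com/rradz/gossip | old_files/systematic_circulant_test.py | generate_jump_combinations
-- ===== SOURCE A (Python) =====
-- import itertools
--
-- def generate_jump_combinations(n, degree):
--     """Generate all valid jump combinations for given n and degree."""
--     if degree % 2 != 0:
--         return []  # Degree must be even for circulant graphs
--
--     num_jumps = degree // 2
--     max_jump = n // 2
--
--     # Generate all combinations of jumps
--     possible_jumps = list(range(1, max_jump))
--     if len(possible_jumps) < num_jumps:
--         return []
--
--     combinations = list(itertools.combinations(possible_jumps, num_jumps))
--     return [list(combo) for combo in combinations]
-- ===== SOURCE B (Python) =====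
-- def generate_jump_combinations(n, degree):
--     """Generate all valid jump combinations for given n and degree."""
--     if degree % 2 != 0:
--         return []  # Degree must be even for circulant graphs
--
--     num_jumps = degree // 2
--     candidates = list(range(1, n // 2))
--     if len(candidates) < num_jumps:
--         return []
--
--     # Dynamic-programming table over suffixes of the candidate list, built right
--     # to left: table[j] holds every size-j combination of the suffix processed
--     # so far, in lexicographic order.
--     table = [[[]]] + [[] for _ in range(num_jumps)]
--     for x in reversed(candidates):
--         for j in range(num_jumps, 0, -1):
--             table[j] = [[x] + c for c in table[j - 1]] + table[j]
--     return table[num_jumps]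
-- ===== Notes on version B (the rewrite author's own statement) =====
-- stated objective: alternative
-- what changed: Replaces the itertools.combinations library call with a dynamic-programming table over suffixes of the candidate list, built right-to-left, whose row j holds all size-j combinations in lexicographic order.
import Mathlib
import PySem

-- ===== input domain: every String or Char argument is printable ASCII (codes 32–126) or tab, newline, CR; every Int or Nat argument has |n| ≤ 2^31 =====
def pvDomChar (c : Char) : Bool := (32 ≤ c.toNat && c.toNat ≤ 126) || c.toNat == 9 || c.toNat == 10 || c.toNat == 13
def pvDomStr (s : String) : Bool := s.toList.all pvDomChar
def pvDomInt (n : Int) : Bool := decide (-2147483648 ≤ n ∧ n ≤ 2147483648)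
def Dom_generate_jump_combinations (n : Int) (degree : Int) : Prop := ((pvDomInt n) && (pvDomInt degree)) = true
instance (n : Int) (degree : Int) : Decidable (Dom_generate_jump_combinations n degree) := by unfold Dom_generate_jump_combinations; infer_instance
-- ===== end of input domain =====

-- B replaces the itertools.combinations call by a right-to-left dynamic-programming table
-- over suffixes of the candidate list (objective: alternative, same cost).

-- ===== PORT A =====
-- itertools.combinations(xs, r) in lexicographic order, combos as lists
-- (no Mathlib counterpart preserves itertools' order; this helper is its exact spec:
--  combinations of x::xs = those containing x, then those avoiding x).
def pyCombinations (r : Nat) (xs : List Int) : List (List Int) :=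
  match r, xs with
  | 0, _ => [[]]
  | _ + 1, [] => []
  | r + 1, x :: rest => (pyCombinations r rest).map (fun c => x :: c) ++ pyCombinations (r + 1) rest

def generate_jump_combinations (n : Int) (degree : Int) : List (List Int) :=
  if PySem.Int.mod degree 2 ≠ 0 then []
  else
    let num_jumps := PySem.Int.floordiv degree 2
    let max_jump := PySem.Int.floordiv n 2
    let possible_jumps := PySem.List.pyRange 1 max_jump 1
    if (possible_jumps.length : Int) < num_jumps then []
    else
      -- num_jumps ≥ 0 under Pre_ (Python raises ValueError for negative r)
      (pyCombinations num_jumps.toNat possible_jumps).map (fun c => c)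

-- ===== PORT B =====
-- one step of the inner descending loop 'for j in range(num_jumps, 0, -1)':
-- each table[j] is rebuilt from the not-yet-updated table[j-1], i.e. a simultaneous
-- one-pass update of the whole table (dpAux carries the previous OLD row).
def dpAux (x : Int) (prev : List (List Int)) : List (List (List Int)) → List (List (List Int))
  | [] => []
  | t :: rest => (prev.map (fun c => x :: c) ++ t) :: dpAux x t rest

def dpStep (x : Int) : List (List (List Int)) → List (List (List Int))
  | [] => []
  | t0 :: rest => t0 :: dpAux x t0 rest

def generate_jump_combinations_alt (n : Int) (degree : Int) : List (List Int) :=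
  if PySem.Int.mod degree 2 ≠ 0 then []
  else
    let num_jumps := PySem.Int.floordiv degree 2
    let candidates := PySem.List.pyRange 1 (PySem.Int.floordiv n 2) 1
    if (candidates.length : Int) < num_jumps then []
    else
      let k := num_jumps.toNat    -- num_jumps ≥ 0 under Pre_
      let table := [[([] : List Int)]] ++ List.replicate k []
      -- 'for x in reversed(candidates)' = foldr over candidates
      let final := candidates.foldr dpStep table
      final.getD k []             -- table[num_jumps]; final has k+1 rows

-- ===== PRECONDITION & SPEC =====
-- Pre_ excludes exactly the inputs where A raises: degree even and negative makes
-- num_jumps < 0, so itertools.combinations raises ValueError ('r must be non-negative').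
def Pre_generate_jump_combinations (n : Int) (degree : Int) : Prop :=
  0 ≤ degree ∨ PySem.Int.mod degree 2 ≠ 0
instance (n : Int) (degree : Int) : Decidable (Pre_generate_jump_combinations n degree) := by
  unfold Pre_generate_jump_combinations; infer_instance

def pvWitness_generate_jump_combinations : Int × Int := (9, 4)

def Spec_generate_jump_combinations (n : Int) (degree : Int) (out : List (List Int)) : Prop := out = generate_jump_combinations_alt n degree
instance (n : Int) (degree : Int) (out : List (List Int)) : Decidable (Spec_generate_jump_combinations n degree out) := by unfold Spec_generate_jump_combinations; infer_instance

-- ===== CLAIM (what is proved, stated in full; the proofs are below) =====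
def Claim_equal_generate_jump_combinations : Prop := ∀ (n : Int) (degree : Int), Dom_generate_jump_combinations n degree → Pre_generate_jump_combinations n degree → Spec_generate_jump_combinations n degree (generate_jump_combinations n degree)

-- ===== LEMMAS AND PROOFS =====

-- the DP invariant's table shape: row j of the table for suffix s is pyCombinations j s
def combTable (k : Nat) (s : List Int) : List (List (List Int)) :=
  (List.range (k + 1)).map (fun j => pyCombinations j s)

lemma combTable_nil (k : Nat) : combTable k [] = [[([] : List Int)]] ++ List.replicate k [] := by
  induction k with
  | zero => rfl
  | succ k ih =>
      unfold combTable at *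
      rw [List.range_succ, List.map_append, ih]
      simp [List.replicate_succ']
      rfl

lemma dpAux_comb (x : Int) (s : List Int) :
    ∀ (k j : Nat),
      dpAux x (pyCombinations j s) ((List.range k).map (fun i => pyCombinations (j + 1 + i) s))
        = (List.range k).map (fun i => pyCombinations (j + 1 + i) (x :: s)) := by
  intro k
  induction k with
  | zero => intro j; simp [dpAux]
  | succ k ih =>
      intro j
      rw [List.range_succ_eq_map]
      simp only [List.map_cons, List.map_map]
      have h1 : (fun i => pyCombinations (j + 1 + i) s) ∘ Nat.succ
          = (fun i => pyCombinations ((j + 1) + 1 + i) s) := by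
        funext i; simp [Function.comp]; congr 1; omega
      have h2 : (fun i => pyCombinations (j + 1 + i) (x :: s)) ∘ Nat.succ
          = (fun i => pyCombinations ((j + 1) + 1 + i) (x :: s)) := by
        funext i; simp [Function.comp]; congr 1; omega
      rw [h1, h2]
      show dpAux x (pyCombinations j s)
          (pyCombinations (j + 1 + 0) s :: (List.range k).map (fun i => pyCombinations (j + 1 + 1 + i) s)) = _
      rw [dpAux]
      have hj : j + 1 + 0 = j + 1 := rfl
      rw [hj]
      have hbody : (pyCombinations j s).map (fun c => x :: c) ++ pyCombinations (j + 1) s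
          = pyCombinations (j + 1) (x :: s) := rfl
      rw [hbody, ih (j + 1)]

lemma dpStep_combTable (x : Int) (k : Nat) (s : List Int) :
    dpStep x (combTable k s) = combTable k (x :: s) := by
  unfold combTable
  rw [List.range_succ_eq_map]
  simp only [List.map_cons, List.map_map]
  have h1 : (fun j => pyCombinations j s) ∘ Nat.succ = (fun i => pyCombinations (0 + 1 + i) s) := by
    funext i; simp [Function.comp]; congr 1; omega
  have h2 : (fun j => pyCombinations j (x :: s)) ∘ Nat.succ
      = (fun i => pyCombinations (0 + 1 + i) (x :: s)) := by
    funext i; simp [Function.comp]; congr 1; omega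
  rw [h1, h2, dpStep]
  have h0 : pyCombinations 0 s = pyCombinations 0 (x :: s) := by cases s <;> rfl
  rw [dpAux_comb x s k 0, h0]

lemma foldr_dpStep (k : Nat) (s : List Int) :
    s.foldr dpStep ([[([] : List Int)]] ++ List.replicate k []) = combTable k s := by
  induction s with
  | nil => simp [combTable_nil]
  | cons x t ih => rw [List.foldr_cons, ih, dpStep_combTable]

lemma combTable_getD (k : Nat) (s : List Int) : (combTable k s).getD k [] = pyCombinations k s := by
  unfold combTable
  have hk : k < (List.range (k + 1)).length := by simp
  rw [List.getD_eq_getElem?_getD]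
  simp

-- ===== VERDICT (by name: the statement is the Claim_ definition above) =====
theorem generate_jump_combinations_spec : Claim_equal_generate_jump_combinations := by
  intro n degree _ _
  unfold Spec_generate_jump_combinations generate_jump_combinations generate_jump_combinations_alt
  by_cases hodd : PySem.Int.mod degree 2 ≠ 0
  · rw [if_pos hodd, if_pos hodd]
  · rw [if_neg hodd, if_neg hodd]
    dsimp only
    split
    · rfl
    · rw [foldr_dpStep, combTable_getD, List.map_id']
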